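-- pv_equiv track=rewrite | github.com/IqrarAli33/AI-Resume-Ranker | src/ranker.py | _focus_jd
-- ===== SOURCE A (Python) =====
-- SEC_HEADINGS = (
--     "requirements", "required", "qualifications", "technical skills",
--     "preferred", "nice to have", "must have", "must-have",
--     "responsibilities", "skills", "experience"
-- )
--
-- def _focus_jd(text: str) -> str:
--     if not text:
--         return ""
--     lines = [l.strip() for l in text.splitlines() if l.strip()]
--     keep, take = [], False
--     for ln in lines:
--         low = ln.lower()
--         if any(h in low for h in SEC_HEADINGS):
--             take = True
--             keep.append(ln)
--             continue
--         if take: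
--             keep.append(ln)
--     focused = "\n".join(keep)
--     return focused if len(focused) > 200 else text
-- ===== SOURCE B (Python) =====
-- SEC_HEADINGS = (
--     "requirements", "required", "qualifications", "technical skills",
--     "preferred", "nice to have", "must have", "must-have",
--     "responsibilities", "skills", "experience"
-- )
--
-- def _is_heading(ln):
--     low = ln.lower()
--     return any(h in low for h in SEC_HEADINGS)
--
-- def _focus_jd(text: str) -> str:
--     if not text:
--         return ""
--     stripped = [l.strip() for l in text.splitlines()]
--     lines = [l for l in stripped if l]
--     # drop the prefix of lines before the first heading line
--     i = 0
--     n = len(lines)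
--     while i < n and not _is_heading(lines[i]):
--         i += 1
--     keep = lines[i:]
--     focused = "\n".join(keep)
--     return focused if len(focused) > 200 else text
-- ===== Notes on version B (the rewrite author's own statement) =====
-- stated objective: simpler
-- what changed: Replaces the latching boolean-flag accumulator fold over (keep, take) with staged passes: strip, filter, then drop the prefix of lines before the first heading (a dropWhile-style scan) and take the remaining suffix.
import Mathlib
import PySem

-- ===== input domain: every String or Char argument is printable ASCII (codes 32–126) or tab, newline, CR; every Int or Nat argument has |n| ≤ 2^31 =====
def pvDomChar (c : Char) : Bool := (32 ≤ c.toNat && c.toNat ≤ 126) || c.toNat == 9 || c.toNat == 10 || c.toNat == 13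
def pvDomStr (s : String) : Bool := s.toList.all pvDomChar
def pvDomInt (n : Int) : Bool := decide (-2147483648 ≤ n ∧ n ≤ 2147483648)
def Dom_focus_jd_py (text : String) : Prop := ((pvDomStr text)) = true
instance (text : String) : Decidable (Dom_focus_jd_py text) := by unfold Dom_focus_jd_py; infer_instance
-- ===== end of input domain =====

-- B replaces A's latching boolean-flag fold with staged passes: strip, filter,
-- then drop the prefix before the first heading line (objective: simpler).

-- ===== PORT A =====
def secHeadings : List String :=
  ["requirements", "required", "qualifications", "technical skills",
   "preferred", "nice to have", "must have", "must-have",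
   "responsibilities", "skills", "experience"]

-- one iteration of A's for-loop over (keep, take)
def focusStep (st : List String × Bool) (ln : String) : List String × Bool :=
  let low := PySem.Str.lower ln
  if secHeadings.any (fun h => PySem.Str.isIn h low) then (st.1 ++ [ln], true)
  else if st.2 then (st.1 ++ [ln], st.2) else st

def focus_jd_py (text : String) : String :=
  if text = "" then ""
  else
    let lines := (PySem.Str.splitlines text).filterMap
      (fun l => if PySem.Str.strip l ≠ "" then some (PySem.Str.strip l) else none)
    let st := lines.foldl focusStep ([], false)
    let focused := PySem.Str.join "\n" st.1
    if PySem.Str.len focused > 200 then focused else text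

-- ===== PORT B =====
def isHeadingB (ln : String) : Bool :=
  secHeadings.any (fun h => PySem.Str.isIn h (PySem.Str.lower ln))

-- B's index-advancing while loop: drop lines until one is a heading
def dropToHeading : List String → List String
  | [] => []
  | ln :: rest => if isHeadingB ln then ln :: rest else dropToHeading rest

def focus_jd_py_alt (text : String) : String :=
  if text = "" then ""
  else
    let stripped := (PySem.Str.splitlines text).map PySem.Str.strip
    let lines := stripped.filter (fun l => l ≠ "")
    let keep := dropToHeading lines
    let focused := PySem.Str.join "\n" keep
    if PySem.Str.len focused > 200 then focused else text

-- ===== PRECONDITION & SPEC =====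
def Spec_focus_jd_py (text : String) (out : String) : Prop := out = focus_jd_py_alt text
instance (text : String) (out : String) : Decidable (Spec_focus_jd_py text out) := by unfold Spec_focus_jd_py; infer_instance

-- ===== CLAIM =====
def Claim_equal_focus_jd_py : Prop := ∀ (text : String), Dom_focus_jd_py text → Spec_focus_jd_py text (focus_jd_py text)

-- ===== LEMMAS AND PROOFS =====

-- once `take` is true, every remaining line is appended
lemma foldl_focusStep_true (xs : List String) (acc : List String) :
    xs.foldl focusStep (acc, true) = (acc ++ xs, true) := by
  induction xs generalizing acc with
  | nil => simp
  | cons x xs ih =>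
    simp only [List.foldl_cons]
    by_cases h : secHeadings.any (fun h => PySem.Str.isIn h (PySem.Str.lower x)) = true
    · simp [focusStep, ih]
    · simp [focusStep, ih]

-- A's fold from the initial state keeps exactly B's dropToHeading suffix
lemma foldl_focusStep_keep (xs : List String) :
    (xs.foldl focusStep ([], false)).1 = dropToHeading xs := by
  induction xs with
  | nil => simp [dropToHeading]
  | cons x xs ih =>
    by_cases h : isHeadingB x = true
    · have h' : secHeadings.any (fun h => PySem.Str.isIn h (PySem.Str.lower x)) = true := h
      simp only [List.foldl_cons, focusStep, h', if_pos]
      rw [foldl_focusStep_true]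
      simp [dropToHeading, h]
    · have h' : ¬ secHeadings.any (fun h => PySem.Str.isIn h (PySem.Str.lower x)) = true := h
      simp only [List.foldl_cons, focusStep, h']
      simp only [Bool.false_eq_true, if_false]
      rw [ih]
      simp [dropToHeading, h]

-- A's filterMap over strip equals B's map-then-filter
lemma filterMap_strip_eq (xs : List String) :
    xs.filterMap (fun l => if PySem.Str.strip l ≠ "" then some (PySem.Str.strip l) else none)
      = (xs.map PySem.Str.strip).filter (fun l => l ≠ "") := by
  induction xs with
  | nil => rfl
  | cons x xs ih =>
    by_cases h : PySem.Str.strip x = ""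
    · simp only [List.filterMap_cons, List.map_cons, List.filter_cons, h]
      simpa using ih
    · simp only [List.filterMap_cons, List.map_cons, List.filter_cons]
      simpa [h] using ih

-- ===== VERDICT =====
theorem focus_jd_py_spec : Claim_equal_focus_jd_py := by
  intro text _
  unfold Spec_focus_jd_py focus_jd_py focus_jd_py_alt
  by_cases h : text = ""
  · simp [h]
  · simp only [h, if_false]
    rw [filterMap_strip_eq, foldl_focusStep_keep]
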